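-- pv_equiv track=rewrite | github.com/miliar/Code_Jam_Webscraper | solutions_python/solutions_year17_round0_nr3/2030.py | find_stalls
-- ===== SOURCE A (Python) =====
-- import math
--
-- def find_stalls(dat):
--     numstl = dat[0]
--     numppl = dat[1]
--
--     if numstl == numppl:
--         return (0, 0)
--
--     # Initialize stall states to [1, 0...0, 1]
--     stall_states = [1] + [0]*numstl + [1]
--     num_stalls = numstl + 2
--     # For each person:
--     x = 0
--     filled = [0, num_stalls - 1]
--     while x < numppl:
--         # Step 2. find the resulting mid points
--         mids = []
--         last_f = 0
--
--         for f in filled[1:]: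
--             p = math.floor((f - last_f)/2 + last_f)
--             mids.append([p, p - last_f - 1, f - p - 1])
--             last_f = f
--
--         # Step 3. Get the optimal position
--         best = [0, -2, -2]
--         for m in mids:
--             if m[1] > best[1] or (m[1] == best[1] and m[2] > best[2]):
--                 best = [ n for n in m ]
--
--         filled.append(best[0])
--         filled.sort()
--
--         x += 1
--
--     return (best[1], best[2]) if best[1] > best[2] else (best[2], best[1])
-- ===== SOURCE B (Python) =====
-- def find_stalls(dat):
--     numstl = dat[0]
--     numppl = dat[1]
--
--     if numstl == numppl:
--         return (0, 0)
--
--     # counter: gap size -> number of gaps of that size; seat whole batches of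
--     # people facing equal-sized gaps at once instead of one person at a time
--     counts = {numstl: 1}
--     k = numppl
--     while True:
--         g = max(counts)
--         c = counts.pop(g)
--         if k <= c:
--             return (g // 2, (g - 1) // 2)
--         k -= c
--         for h in ((g - 1) // 2, g // 2):
--             counts[h] = counts.get(h, 0) + c
-- ===== Notes on version B (the rewrite author's own statement) =====
-- stated objective: faster
-- what changed: B replaces A's person-by-person simulation over the list of occupied positions (recomputing all gap midpoints and re-sorting the position list for every person, plus an O(numstl) stall array) by a counter keyed by gap size that seats all people facing an equal-sized gap in one batch, splitting the whole group of equal gaps at once.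
-- outside the precondition, e.g. on find_stalls([-4, 1]): A returns (-2, -2), B returns (-2, -3); on find_stalls([5, 0]): A raises NameError, B returns (2, 2)
import Mathlib
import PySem

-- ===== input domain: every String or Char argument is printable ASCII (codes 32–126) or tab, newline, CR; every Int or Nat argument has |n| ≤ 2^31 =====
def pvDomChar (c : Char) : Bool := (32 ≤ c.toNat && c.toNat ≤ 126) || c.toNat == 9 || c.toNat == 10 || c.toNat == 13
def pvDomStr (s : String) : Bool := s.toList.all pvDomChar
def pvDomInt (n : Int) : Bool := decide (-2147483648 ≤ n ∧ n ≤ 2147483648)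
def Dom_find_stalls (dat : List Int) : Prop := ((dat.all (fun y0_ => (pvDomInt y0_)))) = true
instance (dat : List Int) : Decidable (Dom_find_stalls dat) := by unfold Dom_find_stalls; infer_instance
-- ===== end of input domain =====

-- B batches all gaps of equal size in a size→count map and splits the whole group at once,
-- instead of A's person-by-person midpoint scan over the occupied-position list: asymptotically faster.

-- ===== PORT A =====
-- one iteration of A's `for f in filled[1:]` midpoint loop; state = (mids so far, last_f).
-- Python computes math.floor((f-last)/2 + last) with float '/': exact (= floor division) for the
-- |n| ≤ 2^31 magnitudes of Dom_find_stalls, ported as integer floor division.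
def aStep (st : List (Int × Int × Int) × Int) (f : Int) : List (Int × Int × Int) × Int :=
  let p := PySem.Int.floordiv (f - st.2) 2 + st.2
  (st.1 ++ [(p, p - st.2 - 1, f - p - 1)], f)

def aMids (filled : List Int) : List (Int × Int × Int) :=
  ((filled.drop 1).foldl aStep ([], 0)).1

-- A's `for m in mids` best-selection loop (branches in Python order)
def aBest (ms : List (Int × Int × Int)) : Int × Int × Int :=
  ms.foldl (fun b m => if m.2.1 > b.2.1 ∨ (m.2.1 = b.2.1 ∧ m.2.2 > b.2.2) then m else b)
    (0, -2, -2)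

-- A's `while x < numppl` loop (runs exactly numppl times); carries (filled, best)
def aLoop : Nat → List Int → (Int × Int × Int) → List Int × (Int × Int × Int)
  | 0, filled, best => (filled, best)
  | Nat.succ n, filled, _ =>
      let best := aBest (aMids filled)
      aLoop n (PySem.List.sorted (filled ++ [best.1]) (fun x => x) false) best

def find_stalls (dat : List Int) : List Int :=
  let numstl := PySem.List.pyGetD dat 0 0   -- dat[0] (Pre_ guarantees the index is in range)
  let numppl := PySem.List.pyGetD dat 1 0   -- dat[1]
  if numstl = numppl then [0, 0]
  else
    -- Python also builds the unused local `stall_states`; it never affects the result and is omitted.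
    let best := (aLoop numppl.toNat [0, numstl + 1] (0, -2, -2)).2
    if best.2.1 > best.2.2 then [best.2.1, best.2.2] else [best.2.2, best.2.1]

-- ===== PORT B =====
-- B's `while True` loop over the gap-size counter; fuel numppl.toNat + 1 suffices because
-- every non-returning iteration decreases k by at least 1 and k ≤ 1 returns at once.
def bLoop : Nat → Int → PySem.Dict Int Int → List Int
  | 0, _, _ => [0, 0]   -- fuel exhausted (never reached from find_stalls_alt's call)
  | Nat.succ fuel, k, counts =>
      let g := (PySem.List.max? counts.keys (fun x => x)).getD 0   -- max(counts)
      let c := counts.getD g 0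
      let counts1 := counts.erase g                                 -- counts.pop(g)
      if k ≤ c then [PySem.Int.floordiv g 2, PySem.Int.floordiv (g - 1) 2]
      else
        let a := PySem.Int.floordiv (g - 1) 2
        let b := PySem.Int.floordiv g 2
        let counts2 := counts1.insert a (counts1.getD a 0 + c)
        let counts3 := counts2.insert b (counts2.getD b 0 + c)
        bLoop fuel (k - c) counts3

def find_stalls_alt (dat : List Int) : List Int :=
  let numstl := PySem.List.pyGetD dat 0 0
  let numppl := PySem.List.pyGetD dat 1 0
  if numstl = numppl then [0, 0]
  else bLoop (numppl.toNat + 1) numppl ((PySem.Dict.empty).insert numstl 1)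

-- ===== PRECONDITION & SPEC =====
-- Pre_ restricts to the problem's natural domain (at least two inputs, and either the trivial
-- numstl = numppl case or a stall count ≥ -1 with at least one person): outside it A either raises
-- NameError (numppl ≤ 0 ≠ numstl leaves `best` undefined) or returns accidental values of its
-- midpoint arithmetic on nonsensical negative stall counts (e.g. dat = [-4, 1]).
def Pre_find_stalls (dat : List Int) : Prop :=
  2 ≤ dat.length ∧ (dat.getD 0 0 = dat.getD 1 0 ∨ (-1 ≤ dat.getD 0 0 ∧ 1 ≤ dat.getD 1 0))
instance (dat : List Int) : Decidable (Pre_find_stalls dat) := by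
  unfold Pre_find_stalls; infer_instance

def pvWitness_find_stalls : List Int := [4, 2]

def Spec_find_stalls (dat : List Int) (out : List Int) : Prop := out = find_stalls_alt dat
instance (dat : List Int) (out : List Int) : Decidable (Spec_find_stalls dat out) := by
  unfold Spec_find_stalls; infer_instance

-- ===== CLAIM (what is proved, stated in full; the proofs are below) =====
def Claim_equal_find_stalls : Prop :=
  ∀ (dat : List Int), Dom_find_stalls dat → Pre_find_stalls dat →
    Spec_find_stalls dat (find_stalls dat)

-- ===== LEMMAS AND PROOFS =====

-- Abbreviations for the proof layer
def fd2 (x : Int) : Int := PySem.Int.floordiv x 2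

theorem fd2_eq (x : Int) : fd2 x = x / 2 :=
  PySem.Int.floordiv_eq_ediv_of_pos (by norm_num)

-- the (left, right) neighbour pair produced by splitting a gap of size g
def keyOf (g : Int) : Int × Int := (fd2 (g - 1), fd2 g)

def gapOf (m : Int × Int × Int) : Int := m.2.1 + m.2.2 + 1

-- gap sizes between consecutive occupied positions
def gapsOf (l : List Int) : List Int := List.zipWith (fun a b => b - a - 1) l l.tail

def midOf (a b : Int) : Int × Int × Int :=
  (PySem.Int.floordiv (b - a) 2 + a,
   PySem.Int.floordiv (b - a) 2 + a - a - 1,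
   b - (PySem.Int.floordiv (b - a) 2 + a) - 1)

-- descending ordered insert
def insDesc (x : Int) (l : List Int) : List Int := List.orderedInsert (· ≥ ·) x l

-- the reference single-split process: state = descending list of gap sizes;
-- sProc n l = the size of the gap the (n+1)-st remaining person gets
def sProc : Nat → List Int → Int
  | 0, l => l.headD 0
  | _ + 1, [] => 0
  | n + 1, g :: t => sProc n (insDesc (fd2 (g - 1)) (insDesc (fd2 g) t))

-- invariant tying A's occupied-position list to the descending gap-size list
def AInv (filled sl : List Int) : Prop :=
  filled.head? = some 0 ∧ 2 ≤ filled.length ∧ filled.Pairwise (· ≤ ·) ∧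
  (gapsOf filled).Perm sl ∧ sl.Pairwise (· ≥ ·) ∧ (∀ x ∈ sl, -1 ≤ x)

def expand (d : PySem.Dict Int Int) : List Int :=
  d.items.flatMap (fun pr => List.replicate pr.2.toNat pr.1)

def BInv (d : PySem.Dict Int Int) (sl : List Int) : Prop :=
  d.keys.Nodup ∧ (∀ pr ∈ d.items, 1 ≤ pr.2) ∧
  (expand d).Perm sl ∧ sl.Pairwise (· ≥ ·) ∧ sl ≠ [] ∧ (∀ x ∈ sl, -1 ≤ x)

theorem fdg (a b : Int) : PySem.Int.floordiv (b - a) 2 = (b - a) / 2 :=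
  PySem.Int.floordiv_eq_ediv_of_pos (by norm_num)

theorem aStep_eq (st : List (Int × Int × Int) × Int) (f : Int) :
    aStep st f = (st.1 ++ [midOf st.2 f], f) := by
  simp [aStep, midOf]

theorem aMids_go (l : List Int) : ∀ (a : Int) (acc : List (Int × Int × Int)),
    (l.foldl aStep (acc, a)).1 = acc ++ List.zipWith midOf (a :: l) l := by
  induction l with
  | nil => simp
  | cons f t ih =>
      intro a acc
      simp only [List.foldl_cons, aStep_eq, List.zipWith]
      rw [ih]
      simp

theorem aMids_eq (l : List Int) : aMids (0 :: l) = List.zipWith midOf (0 :: l) l := by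
  simp [aMids, aMids_go]

theorem midOf_key (a b : Int) : (midOf a b).2 = keyOf (b - a - 1) := by
  simp only [midOf, keyOf, fd2_eq, fdg, Prod.mk.injEq]
  constructor <;> omega

theorem gapOf_midOf (a b : Int) : gapOf (midOf a b) = b - a - 1 := by
  simp only [midOf, gapOf, fdg]; omega

theorem keyOf_inj {g h : Int} (he : keyOf g = keyOf h) : g = h := by
  simp only [keyOf, fd2_eq, Prod.mk.injEq] at he; omega

theorem gapOf_of_key {m : Int × Int × Int} {g : Int} (h : m.2 = keyOf g) : gapOf m = g := by
  simp only [gapOf, h, keyOf, fd2_eq]; omega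

theorem gapsOf_cons2 (x y : Int) (l : List Int) :
    gapsOf (x :: y :: l) = (y - x - 1) :: gapsOf (y :: l) := rfl

theorem gapsOf_eq_map (l : List Int) : ∀ x : Int,
    gapsOf (x :: l) = (List.zipWith midOf (x :: l) l).map gapOf := by
  induction l with
  | nil => intro x; rfl
  | cons y t ih =>
      intro x
      simp only [List.zipWith, List.map_cons, gapsOf_cons2, gapOf_midOf, ih y]

theorem gapsOf_append_cons (a : Int) (ys : List Int) : ∀ xs : List Int,
    gapsOf (xs ++ a :: ys) = gapsOf (xs ++ [a]) ++ gapsOf (a :: ys) := by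
  intro xs
  induction xs with
  | nil => simp [gapsOf]
  | cons x t ih =>
      cases t with
      | nil => simp [gapsOf_cons2]; rfl
      | cons y u =>
          simp only [List.cons_append, gapsOf_cons2] at *
          rw [ih]

theorem mem_zip_consec {m : Int × Int × Int} : ∀ (l : List Int) (x : Int),
    m ∈ List.zipWith midOf (x :: l) l →
    ∃ u a b v, x :: l = u ++ a :: b :: v ∧ m = midOf a b := by
  intro l
  induction l with
  | nil => intro x h; simp [List.zipWith] at h
  | cons y t ih =>
      intro x h
      simp only [List.zipWith, List.mem_cons] at h
      rcases h with h | h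
      · exact ⟨[], x, y, t, rfl, h⟩
      · obtain ⟨u, a, b, v, he, hm⟩ := ih y h
        exact ⟨x :: u, a, b, v, by rw [List.cons_append, ← he], hm⟩

theorem key_cond_iff (g h : Int) :
    ((keyOf h).1 > (keyOf g).1 ∨ ((keyOf h).1 = (keyOf g).1 ∧ (keyOf h).2 > (keyOf g).2)) ↔
      g < h := by
  simp only [keyOf, fd2_eq]; omega

theorem foldl_max_spec (l : List Int) : ∀ a : Int,
    a ≤ l.foldl max a ∧ (∀ x ∈ l, x ≤ l.foldl max a) ∧
      (l.foldl max a = a ∨ l.foldl max a ∈ l) := by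
  induction l with
  | nil => intro a; simp
  | cons y t ih =>
      intro a
      simp only [List.foldl_cons, List.mem_cons]
      obtain ⟨h1, h2, h3⟩ := ih (max a y)
      refine ⟨le_trans (le_max_left _ _) h1, ?_, ?_⟩
      · intro x hx
        rcases hx with rfl | hx
        · exact le_trans (le_max_right _ _) h1
        · exact h2 x hx
      · rcases h3 with h | h
        · rcases max_choice a y with hc | hc <;> rw [hc] at h ⊢
          · exact Or.inl h
          · exact Or.inr (Or.inl h)
        · exact Or.inr (Or.inr h)

theorem aBest_go (ms : List (Int × Int × Int)) :
    ∀ (acc : Int × Int × Int) (h : Int), acc.2 = keyOf h →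
    (∀ m ∈ ms, ∃ g, m.2 = keyOf g) →
    ∃ p, (ms.foldl (fun b m => if m.2.1 > b.2.1 ∨ (m.2.1 = b.2.1 ∧ m.2.2 > b.2.2) then m else b) acc)
          = (p, keyOf ((ms.map gapOf).foldl max h)) ∧
        (p, keyOf ((ms.map gapOf).foldl max h)) ∈ acc :: ms := by
  induction ms with
  | nil =>
      intro acc h hk _
      exact ⟨acc.1, by simp [← hk], by simp [← hk]⟩
  | cons m t ih =>
      intro acc h hk hall
      obtain ⟨g, hg⟩ := hall m (List.mem_cons_self)
      have hgap : gapOf m = g := gapOf_of_key hg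
      simp only [List.foldl_cons, List.map_cons, hgap]
      by_cases hc : (m.2.1 > acc.2.1 ∨ (m.2.1 = acc.2.1 ∧ m.2.2 > acc.2.2))
      · have hlt : h < g := by
          rw [hk] at hc
          have := (key_cond_iff h g)
          rw [hg] at hc
          exact this.mp hc
        rw [if_pos hc]
        have hmax : max h g = g := max_eq_right hlt.le
        obtain ⟨p, hp, hmem⟩ := ih m g hg (fun x hx => hall x (List.mem_cons_of_mem _ hx))
        rw [hmax]
        refine ⟨p, hp, ?_⟩
        rcases List.mem_cons.mp hmem with h1 | h1
        · exact List.mem_cons_of_mem _ (h1 ▸ List.mem_cons_self)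
        · exact List.mem_cons_of_mem _ (List.mem_cons_of_mem _ h1)
      · have hge : g ≤ h := by
          by_contra hno
          push Not at hno
          have := (key_cond_iff h g).mpr hno
          rw [← hg, ← hk] at this
          exact hc this
        rw [if_neg hc]
        have hmax : max h g = h := max_eq_left hge
        obtain ⟨p, hp, hmem⟩ := ih acc h hk (fun x hx => hall x (List.mem_cons_of_mem _ hx))
        rw [hmax]
        refine ⟨p, hp, ?_⟩
        rcases List.mem_cons.mp hmem with h1 | h1
        · exact h1 ▸ List.mem_cons_self
        · exact List.mem_cons_of_mem _ (List.mem_cons_of_mem _ h1)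

theorem aBest_spec (m0 : Int × Int × Int) (ms : List (Int × Int × Int))
    (hall : ∀ m ∈ m0 :: ms, ∃ g, m.2 = keyOf g)
    (hb : ∀ m ∈ m0 :: ms, -1 ≤ gapOf m) :
    ∃ p, aBest (m0 :: ms) = (p, keyOf (((m0 :: ms).map gapOf).foldl max (gapOf m0))) ∧
      (p, keyOf (((m0 :: ms).map gapOf).foldl max (gapOf m0))) ∈ m0 :: ms := by
  obtain ⟨g0, hg0⟩ := hall m0 List.mem_cons_self
  have hgap0 : gapOf m0 = g0 := gapOf_of_key hg0
  have hcond : (m0.2.1 > (-2 : Int) ∨ (m0.2.1 = -2 ∧ m0.2.2 > -2)) := by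
    left
    have := hb m0 List.mem_cons_self
    rw [hgap0] at this
    rw [hg0]
    simp only [keyOf, fd2_eq]
    omega
  unfold aBest
  simp only [List.foldl_cons]
  rw [if_pos hcond]
  obtain ⟨p, hp, hmem⟩ := aBest_go ms m0 g0 hg0 (fun x hx => hall x (List.mem_cons_of_mem _ hx))
  simp only [List.map_cons, List.foldl_cons, hgap0, max_self]
  exact ⟨p, hp, hmem⟩

theorem sorted_insert_mid (u v : List Int) (a b p : Int)
    (hpair : (u ++ a :: b :: v).Pairwise (· ≤ ·)) (hap : a ≤ p) (hpb : p ≤ b) :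
    PySem.List.sorted ((u ++ a :: b :: v) ++ [p]) (fun x => x) false = u ++ a :: p :: b :: v := by
  apply PySem.List.sorted_id_eq_of_perm_of_pairwise
  · have e1 : u ++ a :: p :: b :: v = (u ++ [a]) ++ p :: (b :: v) := by simp
    have e2 : (u ++ [a]) ++ b :: v = u ++ a :: b :: v := by simp
    rw [e1]
    exact List.perm_middle.trans (by rw [e2]; exact (List.perm_append_singleton _ _).symm)
  · rw [List.pairwise_append] at hpair ⊢
    obtain ⟨hu, hrest, hcross⟩ := hpair
    rw [List.pairwise_cons] at hrest
    obtain ⟨ha, hrest2⟩ := hrest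
    rw [List.pairwise_cons] at hrest2
    obtain ⟨hbv, hv⟩ := hrest2
    refine ⟨hu, ?_, ?_⟩
    · rw [List.pairwise_cons]
      constructor
      · intro x hx
        rcases List.mem_cons.mp hx with rfl | hx
        · exact hap
        · rcases List.mem_cons.mp hx with rfl | hx
          · exact le_trans hap hpb
          · exact le_trans hap (le_trans hpb (hbv x hx))
      · rw [List.pairwise_cons]
        refine ⟨?_, by rw [List.pairwise_cons]; exact ⟨hbv, hv⟩⟩
        intro x hx
        rcases List.mem_cons.mp hx with rfl | hx
        · exact hpb
        · exact le_trans hpb (hbv x hx)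
    · intro x hx y hy
      have hxa : x ≤ a := by
        have := hcross x hx a List.mem_cons_self
        exact this
      rcases List.mem_cons.mp hy with rfl | hy
      · exact hxa
      rcases List.mem_cons.mp hy with rfl | hy
      · exact le_trans hxa hap
      · exact hcross x hx y (by simp [hy])

theorem insDesc_ne_nil (x : Int) (l : List Int) : insDesc x l ≠ [] := by
  cases l with
  | nil => simp [insDesc, List.orderedInsert]
  | cons b t =>
      simp only [insDesc, List.orderedInsert]
      split <;> simp

theorem mem_insDesc {y x : Int} {l : List Int} :
    y ∈ insDesc x l ↔ y = x ∨ y ∈ l := List.mem_orderedInsert _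

theorem insDesc_perm (x : Int) (l : List Int) : (insDesc x l).Perm (x :: l) :=
  List.perm_orderedInsert _ x l

theorem insDesc_pairwise (x : Int) {l : List Int} (h : l.Pairwise (· ≥ ·)) :
    (insDesc x l).Pairwise (· ≥ ·) := List.Pairwise.orderedInsert x l h

theorem aStep_spec (filled sl : List Int) (g : Int) (t : List Int)
    (hI : AInv filled sl) (hsl : sl = g :: t) :
    ∃ p, aBest (aMids filled) = (p, keyOf g) ∧
      AInv (PySem.List.sorted (filled ++ [p]) (fun x => x) false)
           (insDesc (fd2 (g - 1)) (insDesc (fd2 g) t)) := by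
  obtain ⟨hhead, hlen, hpair, hperm, hslp, hbnd⟩ := hI
  -- filled = 0 :: l with l ≠ []
  obtain ⟨l, hfl, hlne⟩ : ∃ l, filled = 0 :: l ∧ l ≠ [] := by
    cases filled with
    | nil => simp at hhead
    | cons x l =>
        simp only [List.head?_cons, Option.some.injEq] at hhead
        refine ⟨l, by rw [hhead], ?_⟩
        intro h
        rw [h] at hlen
        simp at hlen
  subst hfl
  have hms : aMids (0 :: l) = List.zipWith midOf (0 :: l) l := aMids_eq l
  have hgm : gapsOf (0 :: l) = (List.zipWith midOf (0 :: l) l).map gapOf := gapsOf_eq_map l 0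
  have hall : ∀ m ∈ List.zipWith midOf (0 :: l) l, ∃ g, m.2 = keyOf g := by
    intro m hm
    obtain ⟨u, a, b, v, _, hmab⟩ := mem_zip_consec l 0 hm
    exact ⟨b - a - 1, by rw [hmab]; exact midOf_key a b⟩
  have hgapmem : ∀ m ∈ List.zipWith midOf (0 :: l) l, gapOf m ∈ sl := by
    intro m hm
    have : gapOf m ∈ gapsOf (0 :: l) := by
      rw [hgm]; exact List.mem_map_of_mem hm
    exact hperm.mem_iff.mp this
  have hbms : ∀ m ∈ List.zipWith midOf (0 :: l) l, -1 ≤ gapOf m := fun m hm =>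
    hbnd _ (hgapmem m hm)
  -- nonempty
  obtain ⟨y, l', rfl⟩ : ∃ y l', l = y :: l' := by
    cases l with
    | nil => exact absurd rfl hlne
    | cons y l' => exact ⟨y, l', rfl⟩
  have hz : List.zipWith midOf (0 :: y :: l') (y :: l') =
      midOf 0 y :: List.zipWith midOf (y :: l') l' := rfl
  obtain ⟨p, hbest, hmem⟩ := aBest_spec (midOf 0 y) (List.zipWith midOf (y :: l') l')
    (by rw [← hz]; exact hall) (by rw [← hz]; exact hbms)
  set H := (((midOf 0 y :: List.zipWith midOf (y :: l') l').map gapOf).foldl max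
      (gapOf (midOf 0 y))) with hH
  -- H = g
  have hHg : H = g := by
    have hspec := foldl_max_spec ((List.zipWith midOf (y :: l') l').map gapOf)
      (max (gapOf (midOf 0 y)) (gapOf (midOf 0 y)))
    have hHeq : H = ((List.zipWith midOf (y :: l') l').map gapOf).foldl max
        (max (gapOf (midOf 0 y)) (gapOf (midOf 0 y))) := by
      rw [hH]; simp
    obtain ⟨h1, h2, h3⟩ := hspec
    rw [← hHeq] at h1 h2 h3
    have hHmem : H ∈ sl := by
      rcases h3 with h | h
      · rw [h, max_self]
        exact hgapmem _ (by rw [hz]; exact List.mem_cons_self)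
      · obtain ⟨m, hm, hgm'⟩ := List.mem_map.mp h
        rw [← hgm']
        exact hgapmem _ (by rw [hz]; exact List.mem_cons_of_mem _ hm)
    have hub : ∀ x ∈ sl, x ≤ H := by
      intro x hx
      have : x ∈ gapsOf (0 :: y :: l') := hperm.mem_iff.mpr hx
      rw [hgm, hz] at this
      simp only [List.map_cons, List.mem_cons] at this
      rcases this with rfl | this
      · exact le_trans (le_max_left _ _) h1
      · exact h2 _ this
    have hge : g ≤ H := hub g (hsl ▸ List.mem_cons_self)
    have hle : H ≤ g := by
      rw [hsl] at hHmem
      rcases List.mem_cons.mp hHmem with heq | hHt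
      · exact le_of_eq heq
      · rw [hsl] at hslp
        exact (List.pairwise_cons.mp hslp).1 H hHt
    omega
  rw [hHg] at hbest hmem
  -- decompose the chosen mid
  obtain ⟨u, a, b, v, hdec, hmab⟩ := mem_zip_consec (y :: l') 0 (hz ▸ hmem)
  have hpk : (p, keyOf g) = midOf a b := hmab
  have hpval : p = PySem.Int.floordiv (b - a) 2 + a := by
    have := congrArg Prod.fst hpk
    simpa [midOf] using this
  have hkey : keyOf (b - a - 1) = keyOf g := by
    have := congrArg Prod.snd hpk
    rw [midOf_key] at this
    exact this.symm
  have hgab : b - a - 1 = g := keyOf_inj hkey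
  have hab : a ≤ b := by
    rw [hdec, List.pairwise_append] at hpair
    have := (List.pairwise_cons.mp hpair.2.1).1 b List.mem_cons_self
    exact this
  have hap : a ≤ p := by rw [hpval, fdg]; omega
  have hpb : p ≤ b := by rw [hpval, fdg]; omega
  refine ⟨p, hms ▸ hbest, ?_⟩
  have hnew : PySem.List.sorted ((0 :: y :: l') ++ [p]) (fun x => x) false
      = u ++ a :: p :: b :: v := by
    rw [hdec]
    exact sorted_insert_mid u v a b p (hdec ▸ hpair) hap hpb
  rw [hnew]
  -- gap bookkeeping
  have hg1 : -1 ≤ g := hbnd g (hsl ▸ List.mem_cons_self)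
  have hlft : p - a - 1 = fd2 (g - 1) := by rw [hpval, fdg, fd2_eq]; omega
  have hrgt : b - p - 1 = fd2 g := by rw [hpval, fdg, fd2_eq]; omega
  have holdg : gapsOf (0 :: y :: l') = gapsOf (u ++ [a]) ++ (b - a - 1) :: gapsOf (b :: v) := by
    rw [hdec, gapsOf_append_cons, gapsOf_cons2]
  have hnewg : gapsOf (u ++ a :: p :: b :: v)
      = gapsOf (u ++ [a]) ++ (p - a - 1) :: (b - p - 1) :: gapsOf (b :: v) := by
    rw [gapsOf_append_cons, gapsOf_cons2, gapsOf_cons2]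
  have hXY : (gapsOf (u ++ [a]) ++ gapsOf (b :: v)).Perm t := by
    have h1 : (gapsOf (u ++ [a]) ++ (b - a - 1) :: gapsOf (b :: v)).Perm
        ((b - a - 1) :: (gapsOf (u ++ [a]) ++ gapsOf (b :: v))) := List.perm_middle
    have h2 := (h1.symm.trans (holdg ▸ hperm)).trans (by rw [hsl])
    rw [hgab] at h2
    exact h2.cons_inv
  constructor
  · -- head
    cases u with
    | nil =>
        have h0 : 0 = a := by simpa using congrArg List.head? hdec
        simp [← h0]
    | cons c u' =>
        have h0 : 0 = c := by simpa using congrArg List.head? hdec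
        simp [← h0]
  refine ⟨?_, ?_, ?_, ?_, ?_⟩
  · simp; omega
  · exact hnew ▸ PySem.List.sorted_pairwise ((0 :: y :: l') ++ [p]) (fun x => x)
  · -- perm of gaps to new sl
    rw [hnewg, hlft, hrgt]
    have h1 : (gapsOf (u ++ [a]) ++ fd2 (g-1) :: fd2 g :: gapsOf (b :: v)).Perm
        (fd2 (g-1) :: (gapsOf (u ++ [a]) ++ fd2 g :: gapsOf (b :: v))) := List.perm_middle
    have h2 : (gapsOf (u ++ [a]) ++ fd2 g :: gapsOf (b :: v)).Perm
        (fd2 g :: (gapsOf (u ++ [a]) ++ gapsOf (b :: v))) := List.perm_middle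
    have h3 := h1.trans (h2.cons (fd2 (g-1)))
    have h4 := h3.trans (((hXY.cons (fd2 g)).cons (fd2 (g-1))))
    have h5 : (fd2 (g-1) :: fd2 g :: t).Perm (insDesc (fd2 (g-1)) (insDesc (fd2 g) t)) := by
      have hb1 : (insDesc (fd2 g) t).Perm (fd2 g :: t) := insDesc_perm _ _
      have hb2 : (insDesc (fd2 (g-1)) (insDesc (fd2 g) t)).Perm
          (fd2 (g-1) :: insDesc (fd2 g) t) := insDesc_perm _ _
      exact ((hb2.trans (hb1.cons _))).symm
    exact h4.trans h5
  · exact insDesc_pairwise _ (insDesc_pairwise _ (by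
      rw [hsl] at hslp
      exact (List.pairwise_cons.mp hslp).2))
  · intro x hx
    rcases mem_insDesc.mp hx with rfl | hx
    · rw [fd2_eq]; omega
    rcases mem_insDesc.mp hx with rfl | hx
    · rw [fd2_eq]; omega
    · exact hbnd x (hsl ▸ List.mem_cons_of_mem _ hx)

theorem aLoop_spec : ∀ (n : Nat) (filled sl : List Int) (b0 : Int × Int × Int)
    (g : Int) (t : List Int), AInv filled sl → sl = g :: t →
    ∃ p, (aLoop (n + 1) filled b0).2 = (p, keyOf (sProc n sl)) := by
  intro n
  induction n with
  | zero =>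
      intro filled sl b0 g t hI hsl
      obtain ⟨p, hbest, _⟩ := aStep_spec filled sl g t hI hsl
      refine ⟨p, ?_⟩
      simp only [aLoop, hbest, hsl, sProc, List.headD_cons]
  | succ n ih =>
      intro filled sl b0 g t hI hsl
      obtain ⟨p, hbest, hInew⟩ := aStep_spec filled sl g t hI hsl
      set sl' := insDesc (fd2 (g - 1)) (insDesc (fd2 g) t) with hsl'
      obtain ⟨g', t', hsl'e⟩ : ∃ g' t', sl' = g' :: t' := by
        cases hc : sl' with
        | nil => exact absurd hc (insDesc_ne_nil _ _)
        | cons g' t' => exact ⟨g', t', rfl⟩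
      obtain ⟨q, hq⟩ := ih (PySem.List.sorted (filled ++ [p]) (fun x => x) false) sl'
        (aBest (aMids filled)) g' t' hInew hsl'e
      refine ⟨q, ?_⟩
      have hunf : aLoop (n + 1 + 1) filled b0
          = aLoop (n + 1) (PySem.List.sorted (filled ++ [aBest (aMids filled) |>.1])
              (fun x => x) false) (aBest (aMids filled)) := rfl
      rw [hunf, hbest]
      simp only [hbest] at hq ⊢
      rw [hq, hsl]
      have : sProc (n + 1) (g :: t) = sProc n sl' := rfl
      rw [this]

theorem count_insDesc (x v : Int) (l : List Int) :
    (insDesc x l).count v = (x :: l).count v := ((insDesc_perm x l).count_eq v)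

theorem insDesc_front {x : Int} {l : List Int} (h : ∀ y ∈ l, y ≤ x) :
    insDesc x l = x :: l := by
  cases l with
  | nil => rfl
  | cons b t =>
      simp only [insDesc, List.orderedInsert]
      rw [if_pos (h b List.mem_cons_self)]

theorem insDesc_skip {x g : Int} (t : List Int) (h : x < g) :
    insDesc x (g :: t) = g :: insDesc x t := by
  simp only [insDesc, List.orderedInsert]
  rw [if_neg (by omega)]

-- the (n+1)-st split still targets a gap of the (unique) maximal size g while n < its multiplicity
theorem sProc_max : ∀ (n : Nat) (l : List Int) (g : Int), l.Pairwise (· ≥ ·) →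
    (∀ x ∈ l, x ≤ g) → -1 ≤ g → (n : Int) < l.count g → sProc n l = g := by
  intro n
  induction n with
  | zero =>
      intro l g hp hle hg hc
      have hmem : g ∈ l := by
        rw [← List.count_pos_iff]; omega
      cases l with
      | nil => simp at hmem
      | cons h t =>
          have h1 : h ≤ g := hle h List.mem_cons_self
          have h2 : g ≤ h := by
            rcases List.mem_cons.mp hmem with heq | hmt
            · omega
            · exact (List.pairwise_cons.mp hp).1 g hmt
          simp only [sProc, List.headD_cons]; omega
  | succ n ih =>
      intro l g hp hle hg hc
      have hmem : g ∈ l := by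
        rw [← List.count_pos_iff]
        have : (0:Int) < l.count g := by omega
        exact_mod_cast this
      cases l with
      | nil => simp at hmem
      | cons h t =>
          have hhg : h = g := by
            have h1 : h ≤ g := hle h List.mem_cons_self
            have h2 : g ≤ h := by
              rcases List.mem_cons.mp hmem with heq | hmt
              · omega
              · exact (List.pairwise_cons.mp hp).1 g hmt
            omega
          subst hhg
          simp only [sProc]
          have hpt : t.Pairwise (· ≥ ·) := (List.pairwise_cons.mp hp).2
          apply ih
          · exact insDesc_pairwise _ (insDesc_pairwise _ hpt)
          · intro x hx
            rcases mem_insDesc.mp hx with rfl | hx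
            · rw [fd2_eq]; omega
            rcases mem_insDesc.mp hx with rfl | hx
            · rw [fd2_eq]; omega
            · exact hle x (List.mem_cons_of_mem _ hx)
          · exact hg
          · have hc' := hc
            simp only [List.count_cons_self] at hc'
            rw [count_insDesc, List.count_cons, count_insDesc, List.count_cons]
            push_cast at hc' ⊢
            split_ifs <;> omega

theorem desc_eq_of_perm {l₁ l₂ : List Int} (h : l₁.Perm l₂)
    (h₁ : l₁.Pairwise (· ≥ ·)) (h₂ : l₂.Pairwise (· ≥ ·)) : l₁ = l₂ :=
  List.Perm.eq_of_pairwise (fun _ _ _ _ hab hba => le_antisymm hba hab) h₁ h₂ h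

theorem head_eq_max {l : List Int} {g : Int} (hp : l.Pairwise (· ≥ ·))
    (hle : ∀ x ∈ l, x ≤ g) (hmem : g ∈ l) : ∃ t, l = g :: t := by
  cases l with
  | nil => simp at hmem
  | cons h t =>
      have h1 : h ≤ g := hle h List.mem_cons_self
      have h2 : g ≤ h := by
        rcases List.mem_cons.mp hmem with heq | hmt
        · omega
        · exact (List.pairwise_cons.mp hp).1 g hmt
      exact ⟨t, by rw [le_antisymm h1 h2]⟩

theorem insDesc_append_repl {x g : Int} (h : x < g) (t : List Int) : ∀ c : Nat,
    insDesc x (List.replicate c g ++ t) = List.replicate c g ++ insDesc x t := by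
  intro c
  induction c with
  | zero => simp
  | succ c ih => simp only [List.replicate_succ, List.cons_append, insDesc_skip _ h, ih]

theorem juggle (a b : Int) (c : Nat) (w : List Int) :
    (List.replicate (c+1) a ++ List.replicate (c+1) b ++ w).Perm
      (List.replicate c a ++ List.replicate c b ++ (a :: b :: w)) := by
  rw [List.perm_iff_count]
  intro v
  simp only [List.count_append, List.count_replicate, List.count_cons]
  split_ifs <;> omega

theorem sProc_batch_pos (g : Int) (hg : 1 ≤ g) : ∀ (c : Nat) (n : Nat) (l L : List Int),
    0 < c → c ≤ n → l.Pairwise (· ≥ ·) → (∀ x ∈ l, x ≤ g) → l.count g = c →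
    L.Pairwise (· ≥ ·) →
    L.Perm (List.replicate c (fd2 (g-1)) ++ List.replicate c (fd2 g)
            ++ l.filter (fun x => !(x == g))) →
    sProc n l = sProc (n - c) L := by
  intro c
  induction c with
  | zero => intro n l L hc; exact absurd hc (lt_irrefl 0)
  | succ c ih =>
      intro n l L _ hcn hp hle hcount hLp hLperm
      have hmem : g ∈ l := by
        rw [← List.count_pos_iff]; omega
      obtain ⟨t, rfl⟩ := head_eq_max hp hle hmem
      have hct : t.count g = c := by
        simp only [List.count_cons_self] at hcount; omega
      have hpt : t.Pairwise (· ≥ ·) := (List.pairwise_cons.mp hp).2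
      have hag : fd2 (g - 1) < g := by rw [fd2_eq]; omega
      have hbg : fd2 g < g := by rw [fd2_eq]; omega
      have hab : fd2 (g - 1) ≤ fd2 g := by rw [fd2_eq, fd2_eq]; omega
      obtain ⟨n', rfl⟩ : ∃ n', n = n' + 1 := ⟨n - 1, by omega⟩
      have hstep : sProc (n' + 1) (g :: t) = sProc n' (insDesc (fd2 (g-1)) (insDesc (fd2 g) t)) := rfl
      set l₂ := insDesc (fd2 (g-1)) (insDesc (fd2 g) t) with hl₂
      have hl₂perm : l₂.Perm (fd2 (g-1) :: fd2 g :: t) :=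
        (insDesc_perm _ _).trans ((insDesc_perm _ _).cons _)
      have hl₂p : l₂.Pairwise (· ≥ ·) := insDesc_pairwise _ (insDesc_pairwise _ hpt)
      have hft : ((g :: t).filter (fun x => !(x == g))) = t.filter (fun x => !(x == g)) := by
        simp
      rw [hstep]
      cases Nat.eq_zero_or_pos c with
      | inl hc0 =>
          subst hc0
          -- count g t = 0 → g ∉ t → filter leaves t unchanged
          have hgt : g ∉ t := by
            rw [← List.count_pos_iff]; omega
          have hft2 : t.filter (fun x => !(x == g)) = t := by
            apply List.filter_eq_self.mpr
            intro x hx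
            simp only [Bool.not_eq_eq_eq_not, Bool.not_true, beq_eq_false_iff_ne, ne_eq]
            intro hxg
            exact hgt (hxg ▸ hx)
          have hLperm' : L.Perm (fd2 (g-1) :: fd2 g :: t) := by
            have := hLperm
            rw [hft, hft2] at this
            simpa using this
          have hLeq : l₂ = L := desc_eq_of_perm (hl₂perm.trans hLperm'.symm) hl₂p hLp
          have hidx : n' + 1 - (0 + 1) = n' := by omega
          rw [hidx, hLeq]
      | inr hcpos =>
          have hane : fd2 (g-1) ≠ g := by rw [fd2_eq]; omega
          have hbne : fd2 g ≠ g := by rw [fd2_eq]; omega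
          have hfl₂ : (l₂.filter (fun x => !(x == g))).Perm
              (fd2 (g-1) :: fd2 g :: t.filter (fun x => !(x == g))) := by
            have := hl₂perm.filter (fun x => !(x == g))
            simpa [List.filter_cons, hane, hbne] using this
          have hidx2 : n' + 1 - (c + 1) = n' - c := by omega
          rw [hidx2]
          apply ih n' l₂ L hcpos (by omega) hl₂p ?hle2 ?hcount2 hLp ?hperm2
          case hle2 =>
            intro x hx
            rcases mem_insDesc.mp hx with rfl | hx
            · omega
            rcases mem_insDesc.mp hx with rfl | hx
            · omega
            · exact hle x (List.mem_cons_of_mem _ hx)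
          case hcount2 =>
            rw [hl₂perm.count_eq]
            simp only [List.count_cons, beq_iff_eq]
            rw [if_neg (by simp only [fd2_eq]; omega), if_neg (by simp only [fd2_eq]; omega)]
            omega
          case hperm2 =>
            have h1 : L.Perm (List.replicate (c+1) (fd2 (g-1)) ++ List.replicate (c+1) (fd2 g)
                ++ t.filter (fun x => !(x == g))) := by rw [← hft]; exact hLperm
            have h2 := h1.trans (juggle (fd2 (g-1)) (fd2 g) c (t.filter (fun x => !(x == g))))
            refine h2.trans ?_
            rw [List.append_assoc, List.append_assoc]
            exact List.Perm.append_left _ (by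
              refine (List.Perm.append_left _ ?_)
              exact hfl₂.symm)

theorem fd2_zero : fd2 0 = 0 := by rw [fd2_eq]; rfl
theorem fd2_neg1 : fd2 (-1) = -1 := by rw [fd2_eq]; rfl
theorem fd2_neg2 : fd2 (0 - 1) = -1 := by rw [fd2_eq]; rfl

theorem pairwise_ge_replicate (k : Nat) (a : Int) : (List.replicate k a).Pairwise (· ≥ ·) :=
  List.pairwise_replicate.mpr (Or.inr (le_refl a))

theorem sProc_neg1 : ∀ (n : Nat) (m : Nat), 0 < m → sProc n (List.replicate m (-1)) = -1 := by
  intro n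
  induction n with
  | zero =>
      intro m hm
      obtain ⟨m', rfl⟩ : ∃ m', m = m' + 1 := ⟨m - 1, by omega⟩
      simp [sProc, List.replicate_succ]
  | succ n ih =>
      intro m hm
      obtain ⟨m', rfl⟩ : ∃ m', m = m' + 1 := ⟨m - 1, by omega⟩
      rw [List.replicate_succ]
      show sProc n (insDesc (fd2 (-1 - 1)) (insDesc (fd2 (-1)) (List.replicate m' (-1)))) = -1
      have h1 : insDesc (fd2 (-1)) (List.replicate m' (-1)) = List.replicate (m' + 1) (-1) := by
        rw [fd2_neg1, insDesc_front (by intro y hy; rw [List.eq_of_mem_replicate hy])]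
        rw [← List.replicate_succ]
      have h2 : fd2 (-1 - 1) = -1 := by rw [fd2_eq]; rfl
      rw [h1, h2, insDesc_front (by intro y hy; rw [List.eq_of_mem_replicate hy])]
      rw [← List.replicate_succ]
      exact ih (m' + 2) (by omega)

theorem sProc_zero_one (n : Nat) (c m : Nat) (hc : 0 < c) (hn : 1 ≤ n) :
    sProc n (List.replicate c 0 ++ List.replicate m (-1))
      = sProc (n - 1) (List.replicate c 0 ++ List.replicate (m + 1) (-1)) := by
  obtain ⟨n', rfl⟩ : ∃ n', n = n' + 1 := ⟨n - 1, by omega⟩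
  obtain ⟨c', rfl⟩ : ∃ c', c = c' + 1 := ⟨c - 1, by omega⟩
  rw [List.replicate_succ, List.cons_append]
  show sProc n' (insDesc (fd2 (0-1)) (insDesc (fd2 0)
      (List.replicate c' 0 ++ List.replicate m (-1)))) = _
  have hle0 : ∀ y ∈ List.replicate c' (0:Int) ++ List.replicate m (-1), y ≤ 0 := by
    intro y hy
    rcases List.mem_append.mp hy with h | h
    · rw [List.eq_of_mem_replicate h]
    · rw [List.eq_of_mem_replicate h]; omega
  rw [fd2_zero, fd2_neg2, insDesc_front hle0]
  rw [show (0:Int) :: (List.replicate c' 0 ++ List.replicate m (-1))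
      = List.replicate (c'+1) 0 ++ List.replicate m (-1) by rw [List.replicate_succ]; rfl]
  rw [insDesc_append_repl (by omega)]
  rw [insDesc_front (by intro y hy; rw [List.eq_of_mem_replicate hy])]
  rw [← List.replicate_succ, Nat.add_sub_cancel, List.replicate_succ, List.cons_append]

theorem sProc_zero_steps : ∀ (j : Nat) (n c m : Nat), 0 < c → j ≤ n →
    sProc n (List.replicate c 0 ++ List.replicate m (-1))
      = sProc (n - j) (List.replicate c 0 ++ List.replicate (m + j) (-1)) := by
  intro j
  induction j with
  | zero => intro n c m _ _; simp
  | succ j ih =>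
      intro n c m hc hj
      rw [sProc_zero_one n c m hc (by omega)]
      rw [ih (n - 1) c (m + 1) hc (by omega)]
      have e1 : n - 1 - j = n - (j + 1) := by omega
      have e2 : m + 1 + j = m + (j + 1) := by omega
      rw [e1, e2]

theorem sProc_batch (g : Int) (hg : -1 ≤ g) (c n : Nat) (l L : List Int)
    (hc : 0 < c) (hcn : c ≤ n) (hp : l.Pairwise (· ≥ ·)) (hle : ∀ x ∈ l, x ≤ g)
    (hlb : ∀ x ∈ l, -1 ≤ x) (hcount : l.count g = c) (hLp : L.Pairwise (· ≥ ·))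
    (hLperm : L.Perm (List.replicate c (fd2 (g-1)) ++ List.replicate c (fd2 g)
            ++ l.filter (fun x => !(x == g)))) :
    sProc n l = sProc (n - c) L := by
  rcases lt_or_ge g 1 with hlt | hge
  · rcases lt_or_ge g 0 with hlt0 | hge0
    · -- g = -1 : every entry is -1
      have hgeq : g = -1 := by omega
      subst hgeq
      have hall : ∀ x ∈ l, x = -1 := fun x hx => le_antisymm (hle x hx) (hlb x hx)
      have hrep : l = List.replicate l.length (-1) := List.eq_replicate_length.mpr hall
      have hlc : l.count (-1) = l.length := by
        rw [hrep]; simp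
      have hfilt : l.filter (fun x => !(x == (-1:Int))) = [] := by
        apply List.filter_eq_nil_iff.mpr
        intro x hx
        simp [hall x hx]
      rw [hfilt] at hLperm
      have hLrep : L = List.replicate (c + c) (-1) := by
        apply desc_eq_of_perm ?_ hLp ?_
        · refine hLperm.trans ?_
          rw [show fd2 (-1-1) = -1 by rw [fd2_eq]; rfl, fd2_neg1]
          rw [List.perm_iff_count]
          intro v
          simp only [List.count_append, List.count_replicate, List.count_nil, beq_iff_eq]
          split_ifs <;> omega
        · exact pairwise_ge_replicate _ _
      have h1 : sProc n l = -1 := by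
        rw [hrep]
        exact sProc_neg1 n l.length (by omega)
      have h2 : sProc (n - c) L = -1 := by
        rw [hLrep]
        exact sProc_neg1 _ (c + c) (by omega)
      omega
    · -- g = 0 : entries are 0 or -1, l = replicate c 0 ++ replicate m (-1)
      have hgeq : g = 0 := by omega
      subst hgeq
      set m := l.count (-1) with hm
      have hrep : l = List.replicate c 0 ++ List.replicate m (-1) := by
        apply desc_eq_of_perm ?_ hp ?_
        · rw [List.perm_iff_count]
          intro v
          simp only [List.count_append, List.count_replicate, beq_iff_eq]
          rcases eq_or_ne v 0 with rfl | hv0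
          · simpa using hcount
          rcases eq_or_ne v (-1) with rfl | hv1
          · simp [hm]
          · have : v ∉ l := by
              intro hmem
              have := hle v hmem
              have := hlb v hmem
              omega
            rw [List.count_eq_zero.mpr this]
            split_ifs <;> omega
        · rw [List.pairwise_append]
          refine ⟨pairwise_ge_replicate _ _, pairwise_ge_replicate _ _, ?_⟩
          intro x hx y hy
          rw [List.eq_of_mem_replicate hx, List.eq_of_mem_replicate hy]
          omega
      have hfilt : l.filter (fun x => !(x == (0:Int))) = List.replicate m (-1) := by
        rw [hrep, List.filter_append]
        simp
      have hLrep : L = List.replicate c 0 ++ List.replicate (m + c) (-1) := by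
        apply desc_eq_of_perm ?_ hLp ?_
        · refine hLperm.trans ?_
          rw [hfilt, fd2_zero, fd2_neg2]
          rw [List.perm_iff_count]
          intro v
          simp only [List.count_append, List.count_replicate, beq_iff_eq]
          split_ifs <;> omega
        · rw [List.pairwise_append]
          refine ⟨pairwise_ge_replicate _ _, pairwise_ge_replicate _ _, ?_⟩
          intro x hx y hy
          rw [List.eq_of_mem_replicate hx, List.eq_of_mem_replicate hy]
          omega
      rw [hrep, hLrep]
      exact sProc_zero_steps c n c m hc hcn
  · exact sProc_batch_pos g hge c n l L hc hcn hp hle hcount hLp hLperm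

-- ---- expand / Dict counting lemmas ----
theorem count_flatMap_not_mem : ∀ (its : List (Int × Int)) (g : Int),
    g ∉ its.map Prod.fst →
    (its.flatMap (fun pr => List.replicate pr.2.toNat pr.1)).count g = 0 := by
  intro its
  induction its with
  | nil => simp
  | cons p rest ih =>
      intro g hg
      simp only [List.map_cons, List.mem_cons, not_or] at hg
      simp only [List.flatMap_cons, List.count_append, List.count_replicate, beq_iff_eq]
      rw [ih g hg.2, if_neg (fun h => hg.1 h.symm)]

theorem count_flatMap_mem : ∀ (its : List (Int × Int)) (g v : Int),
    (its.map Prod.fst).Nodup → (g, v) ∈ its →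
    (its.flatMap (fun pr => List.replicate pr.2.toNat pr.1)).count g = v.toNat := by
  intro its
  induction its with
  | nil => simp
  | cons p rest ih =>
      intro g v hnd hmem
      simp only [List.map_cons, List.nodup_cons] at hnd
      simp only [List.flatMap_cons, List.count_append, List.count_replicate, beq_iff_eq]
      rcases List.mem_cons.mp hmem with rfl | hmem
      · rw [count_flatMap_not_mem rest g hnd.1]
        simp
      · have hne : ¬ (p.1 = g) := by
          intro he
          exact hnd.1 (he ▸ List.mem_map_of_mem hmem)
        rw [ih g v hnd.2 hmem, if_neg hne]
        omega

theorem mem_expand_of_key {d : PySem.Dict Int Int} {x v : Int}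
    (hmem : (x, v) ∈ d.items) (hv : 1 ≤ v) : x ∈ expand d := by
  apply List.mem_flatMap.mpr
  exact ⟨(x, v), hmem, List.mem_replicate.mpr ⟨by omega, rfl⟩⟩

theorem key_of_mem_expand {d : PySem.Dict Int Int} {x : Int}
    (hx : x ∈ expand d) : x ∈ d.keys := by
  obtain ⟨pr, hpr, hrep⟩ := List.mem_flatMap.mp hx
  rw [(List.mem_replicate.mp hrep).2]
  exact List.mem_map_of_mem hpr

theorem getD_nonneg (d : PySem.Dict Int Int) (h : ∀ pr ∈ d.items, 1 ≤ pr.2) (x : Int) :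
    0 ≤ d.getD x 0 := by
  cases hq : d.get? x with
  | none => rw [PySem.Dict.getD_of_get?_eq_none _ _ hq]
  | some v =>
      rw [PySem.Dict.getD_of_get?_eq_some _ _ hq]
      exact le_trans (by omega) (h (x, v) (PySem.Dict.mem_items_of_get?_eq_some d hq))

theorem count_expand (d : PySem.Dict Int Int) (hnd : d.keys.Nodup) (g : Int) :
    (expand d).count g = (d.getD g 0).toNat := by
  cases hq : d.get? g with
  | none =>
      rw [PySem.Dict.getD_of_get?_eq_none _ _ hq]
      apply count_flatMap_not_mem
      exact (PySem.Dict.get?_eq_none_iff_not_mem_keys d g).mp hq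
  | some v =>
      rw [PySem.Dict.getD_of_get?_eq_some _ _ hq]
      exact count_flatMap_mem d.items g v hnd (PySem.Dict.mem_items_of_get?_eq_some d hq)

theorem count_flatMap_filter (g v : Int) : ∀ its : List (Int × Int),
    ((its.filter (fun p => !(p.1 == g))).flatMap
        (fun pr => List.replicate pr.2.toNat pr.1)).count v
      = if v = g then 0
        else (its.flatMap (fun pr => List.replicate pr.2.toNat pr.1)).count v := by
  intro its
  induction its with
  | nil => simp
  | cons p rest ih =>
      simp only [List.filter_cons]
      by_cases hp : p.1 = g
      · rw [if_neg (by simp [hp]), ih]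
        split_ifs with h1
        · rfl
        · simp only [List.flatMap_cons, List.count_append, List.count_replicate, beq_iff_eq]
          rw [if_neg (by omega)]
          omega
      · rw [if_pos (by simpa using hp)]
        simp only [List.flatMap_cons, List.count_append, List.count_replicate, beq_iff_eq]
        rw [ih]
        split_ifs <;> omega

theorem count_expand_erase (d : PySem.Dict Int Int) (g v : Int) :
    (expand (d.erase g)).count v = if v = g then 0 else (expand d).count v :=
  count_flatMap_filter g v d.items

theorem keys_erase_nodup (d : PySem.Dict Int Int) (g : Int) (hnd : d.keys.Nodup) :
    (d.erase g).keys.Nodup := by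
  show ((d.items.filter (fun p => !(p.1 == g))).map Prod.fst).Nodup
  exact hnd.sublist (List.filter_sublist.map Prod.fst)

theorem count_flatMap_replace (h w v : Int) : ∀ its : List (Int × Int),
    (its.map Prod.fst).Nodup → h ∈ its.map Prod.fst →
    ((its.map (fun p => if (p.1 == h) = true then (h, w) else p)).flatMap
        (fun pr => List.replicate pr.2.toNat pr.1)).count v
      = if v = h then w.toNat
        else (its.flatMap (fun pr => List.replicate pr.2.toNat pr.1)).count v := by
  intro its
  induction its with
  | nil => simp
  | cons p rest ih =>
      intro hnd hmem
      simp only [List.map_cons, List.nodup_cons] at hnd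
      by_cases hp : p.1 = h
      · have hcongr : ∀ a ∈ rest, (if (a.1 == h) = true then (h, w) else a) = id a := by
          intro a ha
          rw [if_neg, id_eq]
          simp only [beq_iff_eq]
          intro he
          exact absurd (he ▸ List.mem_map_of_mem ha) (hp ▸ hnd.1)
        rw [List.map_cons, if_pos (by simpa using hp), List.map_congr_left hcongr, List.map_id]
        rw [List.flatMap_cons, List.flatMap_cons]
        simp only [List.count_append, List.count_replicate, beq_iff_eq]
        have hnot : h ∉ rest.map Prod.fst := hp ▸ hnd.1
        by_cases h1 : v = h
        · subst h1
          rw [count_flatMap_not_mem rest v hnot, if_pos rfl, if_pos rfl]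
          omega
        · rw [if_neg (by omega), if_neg h1, if_neg (by omega)]
      · rw [List.map_cons, if_neg (by simpa using hp)]
        rw [List.flatMap_cons, List.flatMap_cons]
        have hmem' : h ∈ rest.map Prod.fst := by
          simp only [List.map_cons, List.mem_cons] at hmem
          rcases hmem with he | hr
          · exact absurd he.symm hp
          · exact hr
        simp only [List.count_append]
        rw [ih hnd.2 hmem']
        simp only [List.count_replicate, beq_iff_eq]
        by_cases h1 : v = h
        · have hpv : ¬ p.1 = v := by omega
          rw [if_pos h1, if_pos h1, if_neg hpv]
          omega
        · rw [if_neg h1, if_neg h1]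

theorem count_expand_insert (d : PySem.Dict Int Int) (hnd : d.keys.Nodup) (h w v : Int) :
    (expand (d.insert h w)).count v = if v = h then w.toNat else (expand d).count v := by
  cases hc : d.contains h with
  | false =>
      have hitems := PySem.Dict.items_insert_of_not_contains d w hc
      have hnot : h ∉ d.keys := by
        intro hk
        rw [(PySem.Dict.contains_iff_mem_keys d h).mpr hk] at hc
        exact absurd hc (by simp)
      show ((d.insert h w).items.flatMap _).count v = _
      rw [hitems, List.flatMap_append, List.flatMap_cons, List.flatMap_nil, List.append_nil]
      simp only [List.count_append, List.count_replicate, beq_iff_eq]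
      by_cases h1 : v = h
      · rw [if_pos h1.symm, if_pos h1]
        rw [count_flatMap_not_mem d.items v (h1 ▸ hnot)]
        omega
      · rw [if_neg (by omega), if_neg h1]
        rw [Nat.add_zero]
        rfl
  | true =>
      have hitems := PySem.Dict.items_insert_of_contains d w hc
      show ((d.insert h w).items.flatMap _).count v = _
      rw [hitems]
      exact count_flatMap_replace h w v d.items hnd
        ((PySem.Dict.contains_iff_mem_keys d h).mp hc)

theorem count_filter_ne (x m : Int) (sl : List Int) :
    (sl.filter (fun y => !(y == m))).count x = if x = m then 0 else sl.count x := by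
  by_cases h1 : x = m
  · subst h1
    rw [if_pos rfl, List.count_eq_zero]
    intro hmem
    have := List.of_mem_filter hmem
    simp at this
  · rw [if_neg h1, List.count_filter (by simpa using h1)]

theorem bLoop_spec : ∀ (fuel : Nat) (k : Int) (counts : PySem.Dict Int Int) (sl : List Int),
    BInv counts sl → 1 ≤ k → k.toNat ≤ fuel →
    bLoop fuel k counts = [fd2 (sProc (k.toNat - 1) sl), fd2 (sProc (k.toNat - 1) sl - 1)] := by
  intro fuel
  induction fuel with
  | zero => intro k counts sl _ hk hf; omega
  | succ fuel ih =>
      intro k counts sl hI hk hf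
      obtain ⟨hnd, hval, hperm, hslp, hne, hbnd⟩ := hI
      obtain ⟨g0, t0, hsl0⟩ : ∃ g0 t0, sl = g0 :: t0 := by
        cases sl with
        | nil => exact absurd rfl hne
        | cons a b => exact ⟨a, b, rfl⟩
      have hks : ∀ x, x ∈ counts.keys ↔ x ∈ sl := by
        intro x
        constructor
        · intro hx
          obtain ⟨⟨p1, p2⟩, hpr, hpr1⟩ := List.mem_map.mp hx
          have hexp : x ∈ expand counts := by
            have hx1 : p1 = x := hpr1
            subst hx1
            exact mem_expand_of_key hpr (hval _ hpr)
          exact hperm.mem_iff.mp hexp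
        · intro hx
          exact key_of_mem_expand (hperm.mem_iff.mpr hx)
      obtain ⟨m, hm⟩ : ∃ m, PySem.List.max? counts.keys (fun x => x) = some m := by
        cases hq : PySem.List.max? counts.keys (fun x => x) with
        | none =>
            have : counts.keys = [] := (PySem.List.max?_eq_none_iff _ _).mp hq
            have hg0 : g0 ∈ counts.keys := (hks g0).mpr (hsl0 ▸ List.mem_cons_self)
            rw [this] at hg0
            simp at hg0
        | some m => exact ⟨m, rfl⟩
      have hmsl : m ∈ sl := (hks m).mp (PySem.List.max?_mem hm)
      have hmax : ∀ x ∈ sl, x ≤ m := fun x hx => PySem.List.max?_isMax hm x ((hks x).mpr hx)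
      have hm1 : -1 ≤ m := hbnd m hmsl
      obtain ⟨t, hslm⟩ := head_eq_max hslp hmax hmsl
      obtain ⟨v, hvitems⟩ : ∃ v, (m, v) ∈ counts.items := by
        obtain ⟨pr, hpr, hpr1⟩ := List.mem_map.mp (PySem.List.max?_mem hm)
        exact ⟨pr.2, by rw [← hpr1]; exact hpr⟩
      have hgetD : counts.getD m 0 = v := PySem.Dict.getD_of_mem_items counts hvitems hnd 0
      have hv1 : 1 ≤ v := hval _ hvitems
      have hcount_sl : sl.count m = v.toNat := by
        rw [← hperm.count_eq, count_expand counts hnd, hgetD]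
      show (let g := (PySem.List.max? counts.keys (fun x => x)).getD 0
            let c := counts.getD g 0
            let counts1 := counts.erase g
            if k ≤ c then [PySem.Int.floordiv g 2, PySem.Int.floordiv (g - 1) 2]
            else
              let a := PySem.Int.floordiv (g - 1) 2
              let b := PySem.Int.floordiv g 2
              let counts2 := counts1.insert a (counts1.getD a 0 + c)
              let counts3 := counts2.insert b (counts2.getD b 0 + c)
              bLoop fuel (k - c) counts3) = _
      simp only [hm, Option.getD_some, hgetD]
      by_cases hkc : k ≤ v
      · rw [if_pos hkc]
        have hG : sProc (k.toNat - 1) sl = m := by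
          apply sProc_max _ _ _ hslp hmax hm1
          rw [hcount_sl]
          omega
        rw [hG]
        rfl
      · rw [if_neg hkc]
        set a := PySem.Int.floordiv (m - 1) 2 with ha
        set b := PySem.Int.floordiv m 2 with hb
        have hafd : a = fd2 (m - 1) := rfl
        have hbfd : b = fd2 m := rfl
        set counts1 := counts.erase m with hc1
        set counts2 := counts1.insert a (counts1.getD a 0 + v) with hc2
        set counts3 := counts2.insert b (counts2.getD b 0 + v) with hc3
        have hnd1 : counts1.keys.Nodup := keys_erase_nodup counts m hnd
        have hnd2 : counts2.keys.Nodup := PySem.Dict.nodup_keys_insert _ _ _ hnd1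
        have hnd3 : counts3.keys.Nodup := PySem.Dict.nodup_keys_insert _ _ _ hnd2
        have hval1 : ∀ pr ∈ counts1.items, 1 ≤ pr.2 := by
          intro pr hpr
          exact hval pr (List.mem_of_mem_filter hpr)
        have hga : 0 ≤ counts1.getD a 0 := getD_nonneg counts1 hval1 a
        have hgb : 0 ≤ counts1.getD b 0 := getD_nonneg counts1 hval1 b
        have hval2 : ∀ pr ∈ counts2.items, 1 ≤ pr.2 := by
          intro pr hpr
          rcases (PySem.Dict.mem_items_insert counts1 a _ pr).mp hpr with rfl | ⟨hpr2, _⟩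
          · simp only
            omega
          · exact hval1 pr hpr2
        have hval3 : ∀ pr ∈ counts3.items, 1 ≤ pr.2 := by
          intro pr hpr
          rcases (PySem.Dict.mem_items_insert counts2 b _ pr).mp hpr with rfl | ⟨hpr2, _⟩
          · have : 0 ≤ counts2.getD b 0 := getD_nonneg counts2 hval2 b
            simp only
            omega
          · exact hval2 pr hpr2
        -- the new descending gap list
        set sl' := PySem.List.sorted (List.replicate v.toNat a ++ List.replicate v.toNat b
            ++ sl.filter (fun x => !(x == m))) (fun x => x) true with hsl'
        have hsl'perm : sl'.Perm (List.replicate v.toNat a ++ List.replicate v.toNat b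
            ++ sl.filter (fun x => !(x == m))) := PySem.List.sorted_perm _ _ _
        have hsl'p : sl'.Pairwise (· ≥ ·) := PySem.List.sorted_pairwise_rev _ _
        -- counts of the new dict
        have hkey : ∀ x, (expand counts3).count x
            = (if x = a then v.toNat else 0) + (if x = b then v.toNat else 0)
              + (if x = m then 0 else sl.count x) := by
          intro x
          have e3 : (expand counts3).count x
              = if x = b then (counts2.getD b 0 + v).toNat else (expand counts2).count x := by
            rw [hc3]; exact count_expand_insert counts2 hnd2 b _ x
          have e2 : (expand counts2).count x
              = if x = a then (counts1.getD a 0 + v).toNat else (expand counts1).count x := by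
            rw [hc2]; exact count_expand_insert counts1 hnd1 a _ x
          have e1 : (expand counts1).count x = if x = m then 0 else sl.count x := by
            rw [hc1, count_expand_erase, hperm.count_eq x]
          have hgdb : counts2.getD b 0 = if b = a then counts1.getD a 0 + v else counts1.getD b 0 := by
            rw [hc2, PySem.Dict.getD_insert]
          have gda : counts1.getD a 0 = if a = m then 0 else (sl.count a : Int) := by
            have h1 := count_expand counts1 hnd1 a
            have h2 : (expand counts1).count a = if a = m then 0 else sl.count a := by
              rw [hc1, count_expand_erase, hperm.count_eq a]
            rw [h2] at h1
            split_ifs at h1 ⊢ <;> omega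
          have gdb : counts1.getD b 0 = if b = m then 0 else (sl.count b : Int) := by
            have h1 := count_expand counts1 hnd1 b
            have h2 : (expand counts1).count b = if b = m then 0 else sl.count b := by
              rw [hc1, count_expand_erase, hperm.count_eq b]
            rw [h2] at h1
            split_ifs at h1 ⊢ <;> omega
          rw [e3, e2, e1, hgdb, gda, gdb]
          clear_value a b
          split_ifs <;> subst_vars <;> omega
        have hperm' : (expand counts3).Perm sl' := by
          rw [List.perm_iff_count]
          intro x
          rw [hkey x, hsl'perm.count_eq x]
          simp only [List.count_append, List.count_replicate, beq_iff_eq, count_filter_ne]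
          split_ifs <;> omega
        have hlen' : sl' ≠ [] := by
          intro h0
          have hl := hsl'perm.length_eq
          rw [h0] at hl
          simp only [List.length_nil, List.length_append, List.length_replicate] at hl
          omega
        have hbnd' : ∀ x ∈ sl', -1 ≤ x := by
          intro x hx
          have hx' := hsl'perm.mem_iff.mp hx
          rcases List.mem_append.mp hx' with hx2 | hx2
          · rcases List.mem_append.mp hx2 with hx3 | hx3
            · rw [List.eq_of_mem_replicate hx3, hafd, fd2_eq]; omega
            · rw [List.eq_of_mem_replicate hx3, hbfd, fd2_eq]; omega
          · exact hbnd x (List.mem_of_mem_filter hx2)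
        have hI' : BInv counts3 sl' := ⟨hnd3, hval3, hperm', hsl'p, hlen', hbnd'⟩
        have h1k : 1 ≤ k - v := by omega
        have hfuel : (k - v).toNat ≤ fuel := by omega
        rw [ih (k - v) counts3 sl' hI' h1k hfuel]
        have hbatch : sProc (k.toNat - 1) sl = sProc ((k.toNat - 1) - v.toNat) sl' := by
          apply sProc_batch m hm1 v.toNat (k.toNat - 1) sl sl' (by omega) (by omega) hslp hmax
            hbnd hcount_sl hsl'p ?_
          rw [← hafd, ← hbfd]
          exact hsl'perm
        have hidx : (k - v).toNat - 1 = (k.toNat - 1) - v.toNat := by omega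
        rw [hidx, ← hbatch]

theorem expand_single (x : Int) : expand ((PySem.Dict.empty).insert x 1) = [x] := by
  have hc : (PySem.Dict.empty : PySem.Dict Int Int).contains x = false := by
    simp [pysem]
  have := PySem.Dict.items_insert_of_not_contains (PySem.Dict.empty : PySem.Dict Int Int)
    (1 : Int) hc
  show ((PySem.Dict.empty.insert x 1).items.flatMap _) = [x]
  rw [this]
  rfl

theorem keyOf_fst_le_snd (g : Int) : ¬ ((keyOf g).1 > (keyOf g).2) := by
  simp only [keyOf, fd2_eq]
  omega

-- ===== VERDICT (by name: the statement is the Claim_ definition above) =====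
theorem find_stalls_spec : Claim_equal_find_stalls := by
  intro dat _hdom hpre
  obtain ⟨hlen, hco⟩ := hpre
  unfold Spec_find_stalls
  have hget0 : PySem.List.pyGetD dat 0 0 = dat.getD 0 0 := by
    rw [PySem.List.pyGetD_of_nonneg dat 0 (by norm_num)]
    rfl
  have hget1 : PySem.List.pyGetD dat 1 0 = dat.getD 1 0 := by
    rw [PySem.List.pyGetD_of_nonneg dat 0 (by norm_num)]
    rfl
  set s := dat.getD 0 0 with hsdef
  set p := dat.getD 1 0 with hpdef
  by_cases hsp : s = p
  · show (if PySem.List.pyGetD dat 0 0 = PySem.List.pyGetD dat 1 0 then _ else _)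
        = (if PySem.List.pyGetD dat 0 0 = PySem.List.pyGetD dat 1 0 then _ else _)
    rw [hget0, hget1, if_pos hsp, if_pos hsp]
  · obtain ⟨hs, hp⟩ : -1 ≤ s ∧ 1 ≤ p := hco.resolve_left hsp
    have hIB : BInv ((PySem.Dict.empty).insert s 1) [s] := by
      refine ⟨?_, ?_, ?_, ?_, ?_, ?_⟩
      · exact PySem.Dict.nodup_keys_insert _ _ _ PySem.Dict.nodup_keys_empty
      · intro pr hpr
        rcases (PySem.Dict.mem_items_insert _ s 1 pr).mp hpr with rfl | ⟨hpr2, _⟩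
        · exact le_refl 1
        · simp [PySem.Dict.empty] at hpr2
      · rw [expand_single]
      · simp
      · simp
      · intro x hx
        simp only [List.mem_singleton] at hx
        omega
    have hB := bLoop_spec (p.toNat + 1) p ((PySem.Dict.empty).insert s 1) [s] hIB hp (by omega)
    have halt : find_stalls_alt dat
        = [fd2 (sProc (p.toNat - 1) [s]), fd2 (sProc (p.toNat - 1) [s] - 1)] := by
      show (if PySem.List.pyGetD dat 0 0 = PySem.List.pyGetD dat 1 0 then _
            else bLoop ((PySem.List.pyGetD dat 1 0).toNat + 1) (PySem.List.pyGetD dat 1 0)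
              ((PySem.Dict.empty).insert (PySem.List.pyGetD dat 0 0) 1)) = _
      rw [hget1, hget0, if_neg hsp]
      exact hB
    have hIA : AInv [0, s + 1] [s] := by
      refine ⟨rfl, by simp, ?_, ?_, ?_, ?_⟩
      · refine List.Pairwise.cons ?_ (List.Pairwise.cons (by simp) List.Pairwise.nil)
        intro y hy
        simp only [List.mem_singleton] at hy
        subst hy
        omega
      · show [s + 1 - 0 - 1].Perm [s]
        rw [show s + 1 - 0 - 1 = s by omega]
      · simp
      · intro x hx
        simp only [List.mem_singleton] at hx
        omega
    obtain ⟨q, hq⟩ := aLoop_spec (p.toNat - 1) [0, s + 1] [s] (0, -2, -2) s [] hIA rfl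
    have hA : find_stalls dat
        = [fd2 (sProc (p.toNat - 1) [s]), fd2 (sProc (p.toNat - 1) [s] - 1)] := by
      show (if PySem.List.pyGetD dat 0 0 = PySem.List.pyGetD dat 1 0 then _ else _) = _
      rw [hget0, hget1, if_neg hsp]
      have hpt : p.toNat = (p.toNat - 1) + 1 := by omega
      rw [hpt, hq]
      rw [if_neg (keyOf_fst_le_snd (sProc (p.toNat - 1) [s]))]
      rfl
    rw [hA, halt]
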